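-- pv_equiv track=rewrite | github.com/NervanaSystems/ngraph | ngraph_api/utils/__init__.py | get_broadcast_axes
-- ===== SOURCE A (Python) =====
-- def get_broadcast_axes(left_shape, right_shape, axis):
--     # type: (TensorShape, TensorShape, Optional[int]) -> Set[int]
--     """Generate a list of broadcast axes for ngraph++ broadcast.
--
--     Informally, a broadcast "adds" axes to the input tensor,
--     replicating elements from the input tensor as needed to fill the new dimensions.
--     Function calculate which of the output axes is being so added.
--     For example, an output shape of `{2,5,6,2,8}` and input shape of `{2,6}` means
--     that the broadcast axes must be `{1,3,4}`.
--     """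
--     axes_indexes = list(range(0, len(left_shape)))
--     if(axis is None):
--         right_begin = len(left_shape) - len(right_shape)
--     else:
--         right_begin = axis
--     right_axes_indexes = list(range(right_begin, right_begin + len(right_shape)))
--     for index in reversed(right_axes_indexes):
--         del axes_indexes[index]
--     return set(axes_indexes)
-- ===== SOURCE B (Python) =====
-- def get_broadcast_axes(left_shape, right_shape, axis):
--     """Directly construct the kept output axes as the two bands around the right-shape block."""
--     n_out = len(left_shape)
--     begin = n_out - len(right_shape) if axis is None else axis
--     begin = begin % n_out if n_out else 0  # a negative axis counts from the end
--     return set(range(0, begin)) | set(range(begin + len(right_shape), n_out))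
-- ===== Notes on version B (the rewrite author's own statement) =====
-- stated objective: simpler
-- what changed: Instead of materialising all output axes and deleting the right-shape block index-by-index in a reversed mutation loop, B normalises the axis (a negative axis is resolved from the end) and directly constructs the kept axes as the union of the two index bands around the block.
-- intended difference: For a negative axis with len(right_shape) >= 2, A's reversed per-index deletion on a shrinking list removes a gapped step-2 set of axes (e.g. it deletes axes {1,3} and returns {0,2} for left=[4,5,6,7], right=[5,6], axis=-2), while B resolves the negative axis from the end numpy-style and removes the contiguous block starting at axis+len(left_shape), returning {0,1}, the intended count-from-the-end reading of a negative axis. — e.g. on get_broadcast_axes([4, 5, 6, 7], [5, 6], some (-2)): A returns [0, 2], B returns [0, 1]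
import Mathlib
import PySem

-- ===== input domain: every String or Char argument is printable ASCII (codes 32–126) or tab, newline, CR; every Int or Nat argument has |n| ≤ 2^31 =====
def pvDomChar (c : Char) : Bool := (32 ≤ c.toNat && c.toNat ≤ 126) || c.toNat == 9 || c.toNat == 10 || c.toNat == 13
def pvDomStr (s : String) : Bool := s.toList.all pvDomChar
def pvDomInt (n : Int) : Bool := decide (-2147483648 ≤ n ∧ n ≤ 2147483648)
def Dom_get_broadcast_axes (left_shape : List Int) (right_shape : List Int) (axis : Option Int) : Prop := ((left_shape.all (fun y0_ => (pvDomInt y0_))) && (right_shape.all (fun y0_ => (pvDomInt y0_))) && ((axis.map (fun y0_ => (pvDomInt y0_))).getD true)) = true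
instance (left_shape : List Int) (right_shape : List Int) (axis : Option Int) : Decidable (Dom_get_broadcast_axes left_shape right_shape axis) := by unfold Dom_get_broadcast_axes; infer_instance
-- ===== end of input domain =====

-- B constructs the kept output axes directly as the two bands around the right-shape
-- block (negative axes resolved from the end), instead of A's reversed deletion loop (simpler).

-- ===== PORT A =====
-- one step of A's 'for index in reversed(right_axes_indexes): del axes_indexes[index]'
-- (none = an IndexError has been raised; excluded by Pre_)
def gbStep (acc : Option (List Int)) (index : Int) : Option (List Int) :=
  acc.bind fun xs => (PySem.List.pop? xs index).map Prod.snd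

def get_broadcast_axes (left_shape : List Int) (right_shape : List Int) (axis : Option Int) : List Int :=
  let axes_indexes := PySem.List.pyRange 0 (left_shape.length : Int) 1
  let right_begin : Int := match axis with
    | none => (left_shape.length : Int) - (right_shape.length : Int)
    | some a => a
  let right_axes_indexes := PySem.List.pyRange right_begin (right_begin + (right_shape.length : Int)) 1
  let res := right_axes_indexes.reverse.foldl gbStep (some axes_indexes)
  PySem.Set.ofList (res.getD [])

-- ===== PORT B =====
def get_broadcast_axes_alt (left_shape : List Int) (right_shape : List Int) (axis : Option Int) : List Int :=
  let n_out : Int := (left_shape.length : Int)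
  let begin0 : Int := match axis with
    | none => n_out - (right_shape.length : Int)
    | some a => a
  let begin1 : Int := if n_out ≠ 0 then PySem.Int.mod begin0 n_out else 0
  PySem.Set.union (PySem.Set.ofList (PySem.List.pyRange 0 begin1 1))
    (PySem.Set.ofList (PySem.List.pyRange (begin1 + (right_shape.length : Int)) n_out 1))

-- ===== PRECONDITION & SPEC =====
-- Pre_ excludes exactly the inputs on which A raises IndexError (the deletion loop runs
-- off the list): with a non-empty right_shape, axis=None needs len(right)<=len(left), and
-- an explicit axis must lie in the band [len(right)-len(left)-1, len(left)-len(right)].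
def Pre_get_broadcast_axes (left_shape : List Int) (right_shape : List Int) (axis : Option Int) : Prop :=
  right_shape = [] ∨
    (axis.getD ((left_shape.length : Int) - (right_shape.length : Int)) + (right_shape.length : Int) ≤ (left_shape.length : Int) ∧
     (right_shape.length : Int) - (left_shape.length : Int) - 1 ≤ axis.getD ((left_shape.length : Int) - (right_shape.length : Int)))

instance (left_shape : List Int) (right_shape : List Int) (axis : Option Int) : Decidable (Pre_get_broadcast_axes left_shape right_shape axis) := by unfold Pre_get_broadcast_axes; infer_instance

def pvWitness_get_broadcast_axes : List Int × List Int × Option Int := ([7, 8, 9], [8], some 1)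

-- For a negative axis with len(right_shape) >= 2, A's reversed per-index deletion on a
-- shrinking list removes a gapped step-2 set of axes (it deletes axes {1,3} and returns
-- {0,2} for left=[4,5,6,7], right=[5,6], axis=-2), while B resolves the negative axis
-- from the end numpy-style and removes the contiguous block starting at
-- axis+len(left_shape), returning {0,1}, the intended count-from-the-end reading.
def D_get_broadcast_axes (_left_shape : List Int) (right_shape : List Int) (axis : Option Int) : Prop :=
  ∃ a, axis = some a ∧ a < 0 ∧ 2 ≤ right_shape.length

instance (left_shape : List Int) (right_shape : List Int) (axis : Option Int) : Decidable (D_get_broadcast_axes left_shape right_shape axis) := by unfold D_get_broadcast_axes; infer_instance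

def Spec_get_broadcast_axes (left_shape : List Int) (right_shape : List Int) (axis : Option Int) (out : List Int) : Prop := ¬ D_get_broadcast_axes left_shape right_shape axis → out = get_broadcast_axes_alt left_shape right_shape axis
instance (left_shape : List Int) (right_shape : List Int) (axis : Option Int) (out : List Int) : Decidable (Spec_get_broadcast_axes left_shape right_shape axis out) := by unfold Spec_get_broadcast_axes; infer_instance

def pvDiffWitness_get_broadcast_axes : List Int × List Int × Option Int := ([4, 5, 6, 7], [5, 6], some (-2))
def pvDiffWitnessOut_get_broadcast_axes : (List Int) × (List Int) := ([0, 2], [0, 1])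

-- ===== CLAIM (what is proved, stated in full; the proofs are below) =====
def Claim_unchanged_get_broadcast_axes : Prop := ∀ (left_shape : List Int) (right_shape : List Int) (axis : Option Int), Dom_get_broadcast_axes left_shape right_shape axis → Pre_get_broadcast_axes left_shape right_shape axis → Spec_get_broadcast_axes left_shape right_shape axis (get_broadcast_axes left_shape right_shape axis)
def Claim_changed_get_broadcast_axes : Prop := Dom_get_broadcast_axes (pvDiffWitness_get_broadcast_axes.1) (pvDiffWitness_get_broadcast_axes.2.1) (pvDiffWitness_get_broadcast_axes.2.2) ∧ Pre_get_broadcast_axes (pvDiffWitness_get_broadcast_axes.1) (pvDiffWitness_get_broadcast_axes.2.1) (pvDiffWitness_get_broadcast_axes.2.2) ∧ D_get_broadcast_axes (pvDiffWitness_get_broadcast_axes.1) (pvDiffWitness_get_broadcast_axes.2.1) (pvDiffWitness_get_broadcast_axes.2.2) ∧ get_broadcast_axes (pvDiffWitness_get_broadcast_axes.1) (pvDiffWitness_get_broadcast_axes.2.1) (pvDiffWitness_get_broadcast_axes.2.2) = pvDiffWitnessOut_get_broadcast_axes.1 ∧ get_broadcast_axes_alt (pvDiffWitness_get_broadcast_axes.1)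 (pvDiffWitness_get_broadcast_axes.2.1) (pvDiffWitness_get_broadcast_axes.2.2) = pvDiffWitnessOut_get_broadcast_axes.2 ∧ pvDiffWitnessOut_get_broadcast_axes.1 ≠ pvDiffWitnessOut_get_broadcast_axes.2

-- ===== LEMMAS AND PROOFS =====

lemma gb_fmod_pos_eq_emod (a b : Int) (hb : 0 < b) : a.fmod b = a % b := by
  rw [Int.fmod_eq_emod]; simp [Or.inl (le_of_lt hb)]

-- A's deletion loop over indices rb+n-1, …, rb (all nonnegative) on a list that starts
-- with the index range [0, rb+n) deletes exactly that block's tail [rb, rb+n).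
lemma gb_loop_del (n : Nat) (rb : Int) (h : 0 ≤ rb) (t : List Int) :
    (PySem.List.pyRange rb (rb + (n : Int)) 1).reverse.foldl gbStep
      (some (PySem.List.pyRange 0 (rb + (n : Int)) 1 ++ t))
    = some (PySem.List.pyRange 0 rb 1 ++ t) := by
  induction n with
  | zero => simp [PySem.List.pyRange_one_eq_nil (le_refl rb)]
  | succ n ih =>
    have hcast : rb + ((n + 1 : Nat) : Int) = (rb + (n : Int)) + 1 := by push_cast; ring
    rw [hcast, PySem.List.pyRange_one_succ_right (by omega : rb ≤ rb + (n : Int)),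
        PySem.List.pyRange_one_succ_right (by omega : (0 : Int) ≤ rb + (n : Int))]
    rw [List.reverse_append, List.reverse_singleton, List.singleton_append, List.foldl_cons]
    have hm : rb + (n : Int) = ((rb + (n : Int)).toNat : Int) := by omega
    have hstep : gbStep (some ((PySem.List.pyRange 0 (rb + (n : Int)) 1 ++ [rb + (n : Int)]) ++ t)) (rb + (n : Int))
        = some (PySem.List.pyRange 0 (rb + (n : Int)) 1 ++ t) := by
      set pre := PySem.List.pyRange 0 (rb + (n : Int)) 1 with hpre
      have hlenpre : pre.length = (rb + (n : Int)).toNat := by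
        simp [hpre, PySem.List.length_pyRange_one]
      have hlt : (rb + (n : Int)).toNat < ((pre ++ [rb + (n : Int)]) ++ t).length := by
        simp [hlenpre]
      have hpop := PySem.List.pop?_natCast ((pre ++ [rb + (n : Int)]) ++ t) ((rb + (n : Int)).toNat) hlt
      rw [gbStep, Option.bind_some, ← hm] at *
      rw [hpop]
      have herase : (pre ++ (rb + (n : Int)) :: t).eraseIdx (rb + (n : Int)).toNat = pre ++ t := by
        rw [List.eraseIdx_append_of_length_le (by omega)]
        simp [hlenpre]
      simp [herase]
    rw [hstep]
    exact ih

-- one deletion at a negative in-range index removes the element counted from the end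
lemma gb_neg_del (L a : Int) (hL : 0 ≤ L) (hlo : -L ≤ a) (hhi : a < 0) :
    gbStep (some (PySem.List.pyRange 0 L 1)) a
      = some (PySem.List.pyRange 0 (L + a) 1 ++ PySem.List.pyRange (L + a + 1) L 1) := by
  have hsplit : PySem.List.pyRange 0 L 1
      = PySem.List.pyRange 0 (L + a) 1 ++ PySem.List.pyRange (L + a) L 1 :=
    PySem.List.pyRange_one_append _ _ _ (by omega) (by omega)
  have hcons : PySem.List.pyRange (L + a) L 1 = (L + a) :: PySem.List.pyRange (L + a + 1) L 1 :=
    PySem.List.pyRange_one_cons (by omega)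
  have hlen : (PySem.List.pyRange 0 L 1).length = L.toNat := by
    simp [PySem.List.length_pyRange_one]
  have hidx : PySem.List.pyIdx? (PySem.List.pyRange 0 L 1).length a = some (L + a).toNat := by
    rw [hlen]
    unfold PySem.List.pyIdx?
    rw [if_neg (by omega), if_pos (by omega)]
    congr 1
    omega
  have hlenpre : (PySem.List.pyRange 0 (L + a) 1).length = (L + a).toNat := by
    simp [PySem.List.length_pyRange_one]
  rw [gbStep, Option.bind_some, PySem.List.pop?, hidx]
  have hget : (PySem.List.pyRange 0 L 1)[(L + a).toNat]? = some (L + a) := by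
    rw [hsplit, hcons, List.getElem?_append_right (by omega), hlenpre]
    simp
  rw [Option.bind_some, hget]
  have herase : (PySem.List.pyRange 0 L 1).eraseIdx (L + a).toNat
      = PySem.List.pyRange 0 (L + a) 1 ++ PySem.List.pyRange (L + a + 1) L 1 := by
    rw [hsplit, hcons, List.eraseIdx_append_of_length_le (by omega)]
    simp [hlenpre]
  simp [herase]

-- adding pairwise-new, pairwise-distinct elements to a set is an append
lemma gb_update_append (xs : List Int) (hnd : xs.Nodup) : ∀ (s : List Int),
    (∀ x ∈ xs, x ∉ s) → PySem.Set.update s xs = s ++ xs := by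
  induction xs with
  | nil => intro s _; simp [PySem.Set.update]
  | cons x t ih =>
    intro s hdisj
    have hx : PySem.Set.add s x = s ++ [x] := by
      have hc : ¬ PySem.Set.contains s x = true :=
        mt (PySem.Set.contains_iff s x).mp (hdisj x (by simp))
      rw [PySem.Set.add, if_neg hc]
    show PySem.Set.update (PySem.Set.add s x) t = s ++ x :: t
    rw [hx, ih hnd.of_cons (s ++ [x]) (by
      intro y hy
      simp only [List.mem_append, List.mem_singleton]
      rintro (h | h)
      · exact hdisj y (by simp [hy]) h
      · exact (List.Nodup.notMem hnd) (h ▸ hy))]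
    simp

-- B's union of the two kept bands is their concatenation
lemma gb_union_ranges (b c L : Int) (hbc : b ≤ c) :
    PySem.Set.union (PySem.Set.ofList (PySem.List.pyRange 0 b 1))
      (PySem.Set.ofList (PySem.List.pyRange c L 1))
    = PySem.List.pyRange 0 b 1 ++ PySem.List.pyRange c L 1 := by
  rw [PySem.Set.ofList_eq_self_of_nodup _ (PySem.List.nodup_pyRange_one _ _),
      PySem.Set.ofList_eq_self_of_nodup _ (PySem.List.nodup_pyRange_one _ _)]
  exact gb_update_append _ (PySem.List.nodup_pyRange_one _ _) _ (by
    intro x hx hmem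
    rw [PySem.List.mem_pyRange_one] at hx hmem
    omega)

-- A's full value for a nonnegative in-range block start
lemma gb_a_value (L rb : Int) (n : Nat) (h0 : 0 ≤ rb) (hle : rb + (n : Int) ≤ L) :
    ((PySem.List.pyRange rb (rb + (n : Int)) 1).reverse.foldl gbStep
        (some (PySem.List.pyRange 0 L 1))).getD []
    = PySem.List.pyRange 0 rb 1 ++ PySem.List.pyRange (rb + (n : Int)) L 1 := by
  have hsplit : PySem.List.pyRange 0 L 1
      = PySem.List.pyRange 0 (rb + (n : Int)) 1 ++ PySem.List.pyRange (rb + (n : Int)) L 1 :=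
    PySem.List.pyRange_one_append _ _ _ (by omega) hle
  rw [hsplit, gb_loop_del n rb h0]
  rfl

-- appended disjoint index ranges have no duplicates
lemma gb_nodup_two (a b c d : Int) (h : b ≤ c) :
    (PySem.List.pyRange a b 1 ++ PySem.List.pyRange c d 1).Nodup := by
  refine List.Nodup.append (PySem.List.nodup_pyRange_one _ _) (PySem.List.nodup_pyRange_one _ _) ?_
  intro x hx hy
  rw [PySem.List.mem_pyRange_one] at hx hy
  omega

-- both ports agree for a normalised block start 0 ≤ rb with rb + n ≤ L
lemma gb_main (L rb : Int) (n : Nat) (h0 : 0 ≤ rb) (hle : rb + (n : Int) ≤ L) :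
    PySem.Set.ofList (((PySem.List.pyRange rb (rb + (n : Int)) 1).reverse.foldl gbStep
        (some (PySem.List.pyRange 0 L 1))).getD [])
    = PySem.Set.union (PySem.Set.ofList (PySem.List.pyRange 0 rb 1))
        (PySem.Set.ofList (PySem.List.pyRange (rb + (n : Int)) L 1)) := by
  rw [gb_a_value L rb n h0 hle, gb_union_ranges rb (rb + (n : Int)) L (by omega),
      PySem.Set.ofList_eq_self_of_nodup _ (gb_nodup_two 0 rb (rb + (n : Int)) L (by omega))]

-- ===== VERDICT (by name: the statement is the Claim_ definition above) =====
theorem get_broadcast_axes_spec : Claim_unchanged_get_broadcast_axes := by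
  intro l r axis hdom hpre
  unfold Spec_get_broadcast_axes
  intro hnd
  rcases Decidable.em (r = []) with hr | hr
  · -- empty right shape: nothing is deleted, and B's two bands tile the whole range
    subst hr
    cases axis with
    | none =>
      simp only [get_broadcast_axes, get_broadcast_axes_alt, List.length_nil, Nat.cast_zero,
        Int.sub_zero, Int.add_zero]
      rcases Decidable.em ((l.length : Int) = 0) with hL | hL
      · rw [if_neg (by omega), PySem.List.pyRange_one_eq_nil (by omega : (l.length : Int) ≤ 0)]
        simp [PySem.Set.union, PySem.Set.update, PySem.Set.ofList, PySem.List.pyRange_one_eq_nil (le_refl (0 : Int))]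
      · rw [if_pos hL, PySem.List.pyRange_one_eq_nil (le_refl (l.length : Int))]
        have hmod : PySem.Int.mod (l.length : Int) (l.length : Int) = 0 := by
          show Int.fmod _ _ = 0
          rw [gb_fmod_pos_eq_emod _ _ (by omega)]
          simp
        rw [hmod, gb_union_ranges 0 0 (l.length : Int) (le_refl 0),
            PySem.List.pyRange_one_eq_nil (le_refl (0 : Int)), List.nil_append]
        simp [PySem.Set.ofList_eq_self_of_nodup _ (PySem.List.nodup_pyRange_one 0 (l.length : Int))]
    | some a =>
      simp only [get_broadcast_axes, get_broadcast_axes_alt, List.length_nil, Nat.cast_zero,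
        Int.add_zero]
      rw [PySem.List.pyRange_one_eq_nil (le_refl a)]
      rcases Decidable.em ((l.length : Int) = 0) with hL | hL
      · rw [if_neg (by omega), PySem.List.pyRange_one_eq_nil (by omega : (l.length : Int) ≤ 0),
            PySem.List.pyRange_one_eq_nil (le_refl (0 : Int))]
        simp [PySem.Set.union, PySem.Set.update, PySem.Set.ofList]
      · rw [if_pos hL]
        have hb : 0 ≤ PySem.Int.mod a (l.length : Int) ∧ PySem.Int.mod a (l.length : Int) < (l.length : Int) := by
          constructor
          · show 0 ≤ Int.fmod _ _
            rw [gb_fmod_pos_eq_emod _ _ (by omega)]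
            exact Int.emod_nonneg a (by omega)
          · show Int.fmod _ _ < _
            rw [gb_fmod_pos_eq_emod _ _ (by omega)]
            exact Int.emod_lt_of_pos a (by omega)
        rw [gb_union_ranges (PySem.Int.mod a (l.length : Int)) (PySem.Int.mod a (l.length : Int)) (l.length : Int) (le_refl _),
            ← PySem.List.pyRange_one_append 0 (PySem.Int.mod a (l.length : Int)) (l.length : Int) hb.1 (by omega)]
        simp [PySem.Set.ofList_eq_self_of_nodup _ (PySem.List.nodup_pyRange_one 0 (l.length : Int))]
  · -- non-empty right shape
    have hpre' := hpre.resolve_left hr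
    have hn1 : 1 ≤ (r.length : Int) := by
      have := List.length_pos_of_ne_nil hr
      omega
    cases axis with
    | none =>
      simp only [Option.getD_none] at hpre'
      have h0 : 0 ≤ (l.length : Int) - (r.length : Int) := by omega
      have hL : (l.length : Int) ≠ 0 := by omega
      simp only [get_broadcast_axes, get_broadcast_axes_alt]
      rw [if_pos hL]
      have hmod : PySem.Int.mod ((l.length : Int) - (r.length : Int)) (l.length : Int)
          = (l.length : Int) - (r.length : Int) := by
        show Int.fmod _ _ = _
        rw [gb_fmod_pos_eq_emod _ _ (by omega)]
        exact Int.emod_eq_of_lt h0 (by omega)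
      rw [hmod]
      exact gb_main (l.length : Int) ((l.length : Int) - (r.length : Int)) r.length h0 (by omega)
    | some a =>
      simp only [Option.getD_some] at hpre'
      rcases Decidable.em (0 ≤ a) with ha | ha
      · -- nonnegative explicit axis
        have hL : (l.length : Int) ≠ 0 := by omega
        simp only [get_broadcast_axes, get_broadcast_axes_alt]
        rw [if_pos hL]
        have hmod : PySem.Int.mod a (l.length : Int) = a := by
          show Int.fmod _ _ = _
          rw [gb_fmod_pos_eq_emod _ _ (by omega)]
          exact Int.emod_eq_of_lt ha (by omega)
        rw [hmod]
        exact gb_main (l.length : Int) a r.length ha (by omega)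
      · -- negative axis: outside D_ this forces len(right) = 1, one deletion from the end
        have hone : r.length = 1 := by
          by_contra hne
          exact hnd ⟨a, rfl, by omega, by omega⟩
        have hL : (l.length : Int) ≠ 0 := by omega
        simp only [get_broadcast_axes, get_broadcast_axes_alt, hone, Nat.cast_one]
        rw [if_pos hL]
        have hmod : PySem.Int.mod a (l.length : Int) = (l.length : Int) + a := by
          show Int.fmod _ _ = _
          rw [gb_fmod_pos_eq_emod _ _ (by omega), ← Int.add_emod_right]
          rw [Int.add_comm a (l.length : Int)]
          exact Int.emod_eq_of_lt (by omega) (by omega)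
        rw [hmod]
        have hrange : PySem.List.pyRange a (a + 1) 1 = [a] := by
          rw [PySem.List.pyRange_one_succ_right (le_refl a),
              PySem.List.pyRange_one_eq_nil (le_refl a), List.nil_append]
        rw [hrange, List.reverse_singleton, List.foldl_cons,
            gb_neg_del (l.length : Int) a (by omega) (by omega) (by omega), List.foldl_nil,
            Option.getD_some,
            gb_union_ranges ((l.length : Int) + a) ((l.length : Int) + a + 1) (l.length : Int) (by omega),
            PySem.Set.ofList_eq_self_of_nodup _ (gb_nodup_two 0 ((l.length : Int) + a) ((l.length : Int) + a + 1) (l.length : Int) (by omega))]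

theorem get_broadcast_axes_changed : Claim_changed_get_broadcast_axes := by
  unfold Claim_changed_get_broadcast_axes; decide
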